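-- pv_equiv track=rewrite | github.com/VarshaUmarani/Python | Assignments/Assign7_2.py | CountOdd
-- ===== SOURCE A (Python) =====
-- def CountOdd(No):
-- 	Cnt = 0
-- 	Digit = 0
--
-- 	if No < 0:
-- 		No = -(No)
--
-- 	while No != 0:
-- 		Digit = No % 10
-- 		if Digit % 2 != 0:
-- 			Cnt = Cnt + 1
-- 		No = int(No / 10)
--
-- 	return Cnt
-- ===== SOURCE B (Python) =====
-- def CountOdd(No):
--     return sum(1 for c in str(abs(No)) if int(c) % 2 == 1)
-- ===== Notes on version B (the rewrite author's own statement) =====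
-- stated objective: idiomatic
-- what changed: B counts odd digits by iterating over the characters of str(abs(No)) in a generator-sum, instead of A's while-loop that repeatedly takes the last decimal digit and truncating-divides a running quotient.
import Mathlib
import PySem

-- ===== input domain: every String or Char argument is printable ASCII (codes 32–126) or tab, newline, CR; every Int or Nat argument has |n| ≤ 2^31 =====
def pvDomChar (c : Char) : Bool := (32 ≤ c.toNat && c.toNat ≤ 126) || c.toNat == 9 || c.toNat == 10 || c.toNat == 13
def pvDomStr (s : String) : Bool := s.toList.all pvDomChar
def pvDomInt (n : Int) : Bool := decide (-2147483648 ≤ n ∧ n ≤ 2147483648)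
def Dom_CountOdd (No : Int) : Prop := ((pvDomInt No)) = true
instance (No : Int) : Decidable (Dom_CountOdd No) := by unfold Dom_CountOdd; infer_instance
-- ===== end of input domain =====

-- B changes the digit source: it counts odd characters of str(abs(No)) instead of A's
-- running modulus/truncating-division loop (objective: idiomatic; no speed claim).

-- ===== PORT A =====
-- A's while-loop with its Cnt accumulator. After the abs step No is nonnegative, so the
-- loop state is carried as a Nat; `int(No / 10)` on nonnegative ints of this size is exact
-- floor division, ported as Nat `/`.
def CountOddLoopA (no : Nat) (cnt : Int) : Int :=
  if no = 0 then cnt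
  else CountOddLoopA (no / 10) (if no % 10 % 2 ≠ 0 then cnt + 1 else cnt)
decreasing_by exact Nat.div_lt_self (Nat.pos_of_ne_zero (by assumption)) (by omega)

def CountOdd (No : Int) : Int :=
  CountOddLoopA (if No < 0 then -No else No).toNat 0

-- ===== PORT B =====
-- sum(1 for c in str(abs(No)) if int(c) % 2 == 1); `int(c) % 2 == 1` is ported as
-- (c.toNat - 48) % 2 == 1, exact on the digit characters str() produces.
def CountOdd_alt (No : Int) : Int :=
  ((PySem.Int.toStr |No|).toList.filter (fun c => (c.toNat - 48) % 2 == 1)).length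

-- ===== PRECONDITION & SPEC =====
def Spec_CountOdd (No : Int) (out : Int) : Prop := out = CountOdd_alt No
instance (No : Int) (out : Int) : Decidable (Spec_CountOdd No out) := by unfold Spec_CountOdd; infer_instance

-- ===== CLAIM (what is proved, stated in full; the proofs are below) =====
def Claim_equal_CountOdd : Prop := ∀ (No : Int), Dom_CountOdd No → Spec_CountOdd No (CountOdd No)

-- ===== LEMMAS AND PROOFS =====

/-- Reference count of odd decimal digits of a natural number. -/
def oddDigits (n : Nat) : Nat :=
  if n = 0 then 0 else (if n % 10 % 2 = 1 then 1 else 0) + oddDigits (n / 10)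
decreasing_by exact Nat.div_lt_self (Nat.pos_of_ne_zero (by assumption)) (by omega)

theorem countOddLoopA_eq (n : Nat) : ∀ cnt : Int, CountOddLoopA n cnt = cnt + oddDigits n := by
  induction n using Nat.strong_induction_on with
  | _ n ih =>
    intro cnt
    rw [CountOddLoopA, oddDigits]
    by_cases h : n = 0
    · simp [h]
    · have hd : n / 10 < n := Nat.div_lt_self (Nat.pos_of_ne_zero h) (by omega)
      rw [ih _ hd]
      have : n % 10 % 2 = 1 ∨ n % 10 % 2 = 0 := by omega
      rcases this with h2 | h2 <;> simp [h, h2] <;> push_cast <;> ring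

theorem digitChar_odd (m : Nat) (hm : m < 10) :
    (((Nat.digitChar m).toNat - 48) % 2 == 1) = decide (m % 2 = 1) := by
  interval_cases m <;> decide

theorem oddDigits_lt10 (n : Nat) (hn : n < 10) : oddDigits n = if n % 2 = 1 then 1 else 0 := by
  rw [oddDigits]
  by_cases h0 : n = 0
  · simp [h0]
  · rw [if_neg h0, Nat.div_eq_of_lt hn, oddDigits]
    simp [Nat.mod_eq_of_lt hn]

theorem toDigitsCore_oddCount (f : Nat) : ∀ (n : Nat) (acc : List Char), n < 10 ^ f →
    ((Nat.toDigitsCore 10 f n acc).filter (fun c => (c.toNat - 48) % 2 == 1)).length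
      = oddDigits n + (acc.filter (fun c => (c.toNat - 48) % 2 == 1)).length := by
  induction f with
  | zero =>
    intro n acc h
    have h0 : n = 0 := by simpa using h
    simp [h0, Nat.toDigitsCore, oddDigits]
  | succ f ih =>
    intro n acc h
    rw [Nat.toDigitsCore]
    by_cases hq : n / 10 = 0
    · have hn : n < 10 := by omega
      rw [if_pos hq, List.filter_cons, digitChar_odd (n % 10) (by omega),
        oddDigits_lt10 n hn]
      simp only [Nat.mod_eq_of_lt hn]
      by_cases h2 : n % 2 = 1
      · simp [h2]; omega
      · simp [h2]
    · have hne : n ≠ 0 := by omega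
      have hdiv : n / 10 < 10 ^ f := by
        rw [Nat.div_lt_iff_lt_mul (by omega)]
        have hp : 10 ^ (f + 1) = 10 ^ f * 10 := by ring
        omega
      rw [if_neg hq, ih (n / 10) _ hdiv, List.filter_cons, digitChar_odd (n % 10) (by omega)]
      conv_rhs => rw [oddDigits]
      rw [if_neg hne]
      have hmm : n % 10 % 2 = n % 2 := Nat.mod_mod_of_dvd n (by norm_num)
      rw [hmm]
      by_cases h2 : n % 2 = 1
      · simp [h2]; omega
      · simp [h2]

theorem toDigits_oddCount (n : Nat) :
    ((Nat.toDigits 10 n).filter (fun c => (c.toNat - 48) % 2 == 1)).length = oddDigits n := by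
  have h : n < 10 ^ (n + 1) := by
    calc n < n + 1 := Nat.lt_succ_self n
      _ ≤ 10 ^ (n + 1) := Nat.le_of_lt (Nat.lt_pow_self (by omega))
  simpa using toDigitsCore_oddCount (n + 1) n [] h

-- ===== VERDICT (by name: the statement is the Claim_ definition above) =====
theorem CountOdd_spec : Claim_equal_CountOdd := by
  intro No _
  unfold Spec_CountOdd CountOdd CountOdd_alt
  rw [countOddLoopA_eq]
  have habs : (if No < 0 then -No else No) = |No| := by
    by_cases h : No < 0 <;> simp [h, abs_of_neg, abs_of_nonneg, le_of_not_gt] <;> omega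
  rw [habs]
  rw [show (PySem.Int.toStr |No|).toList = PySem.Int.toChars |No| from PySem.Int.toList_toStr _]
  rw [PySem.Int.toChars, if_neg (not_lt.mpr (abs_nonneg No))]
  rw [toDigits_oddCount]
  simp
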